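-- pv_equiv track=rewrite | github.com/fedoseevtaf/GIF | lzw.py | packlzw
-- ===== SOURCE A (Python) =====
-- def packlzw(codes):
--     string = ''
--
--     for n, L in codes:
--         n = bin(n)[2:]
--         n = (L - len(n)) * '0' + n
--         string = n + string
--
--         while len(string) >= 8:
--             yield int(string[-8:], base=2)
--             string = string[:-8]
--     if string:
--         yield int(string, base=2)
-- ===== SOURCE B (Python) =====
-- def packlzw(codes):
--     # Two-phase: lay out the whole bit stream, then emit its bytes low-end first.
--     stream = ''.join(bin(n)[2:].zfill(L) for n, L in reversed(codes))
--     acc = int(stream, 2) if stream else 0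
--     for _ in range(len(stream) // 8):
--         yield acc % 256
--         acc >>= 8
--     if len(stream) % 8:
--         yield acc
-- ===== Notes on version B (the rewrite author's own statement) =====
-- stated objective: alternative
-- what changed: Replaces A's interleaved loop (prepend each code's padded bit string to a sliding buffer and peel 8-character chunks as it goes) with two separate phases: join all padded codes into one complete bit string, parse it once into an integer, then emit that integer's bytes in a counted arithmetic loop; Pre_ excludes codes with a negative n, where bin() leaks a stray 'b' character into the bit string and A usually raises ValueError and otherwise returns an accidental value of int()'s '0b'-literal-prefix parsing.
-- outside the precondition, e.g. on packlzw([(2, 0), (-14, 7)]): A returns [58, 0], B raises ValueError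
import Mathlib
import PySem

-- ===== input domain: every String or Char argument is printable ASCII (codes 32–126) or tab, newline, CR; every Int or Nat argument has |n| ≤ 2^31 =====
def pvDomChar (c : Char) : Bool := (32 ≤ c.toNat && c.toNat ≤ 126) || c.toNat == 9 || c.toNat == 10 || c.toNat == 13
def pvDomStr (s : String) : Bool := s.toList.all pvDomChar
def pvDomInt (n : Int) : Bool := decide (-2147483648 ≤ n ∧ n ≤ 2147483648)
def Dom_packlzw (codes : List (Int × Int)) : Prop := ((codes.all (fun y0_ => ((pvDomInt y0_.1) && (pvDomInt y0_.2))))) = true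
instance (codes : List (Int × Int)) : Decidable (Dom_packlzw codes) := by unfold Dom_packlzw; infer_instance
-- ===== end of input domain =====

-- B builds the complete bit stream once (join of zfill-padded codes), parses it into one
-- integer, and emits its bytes in a counted arithmetic loop; objective: alternative.

-- ===== PORT A =====
-- bin(n)[2:] for n ≥ 0 (digits of n in base 2, most significant first; bin(0)[2:] = "0")
def pvBinAux : Nat → List Char
  | 0 => []
  | (n+1) => pvBinAux ((n+1) / 2) ++ [if (n+1) % 2 = 1 then '1' else '0']
decreasing_by exact Nat.div_lt_self (Nat.succ_pos n) one_lt_two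

def pvBin (n : Nat) : List Char := if n = 0 then ['0'] else pvBinAux n

-- int(s, base=2) for a string of '0'/'1' characters
def pvInt2 (s : List Char) : Int := s.foldl (fun a c => 2 * a + (if c = '1' then 1 else 0)) 0

-- the inner `while len(string) >= 8: yield int(string[-8:], 2); string = string[:-8]` loop
def pvEmit (string : List Char) (out : List Int) : List Int × List Char :=
  if 8 ≤ string.length then
    pvEmit (string.take (string.length - 8)) (out ++ [pvInt2 (string.drop (string.length - 8))])
  else (out, string)
termination_by string.length
decreasing_by simp; omega

-- the generator's yields, collected into a list; n.toNat because A raises on negative n (Pre_)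
def packlzw (codes : List (Int × Int)) : List Int :=
  let st := codes.foldl
    (fun (st : List Int × List Char) nc =>
      let nb := pvBin nc.1.toNat
      let padded := List.replicate (nc.2 - (nb.length : Int)).toNat '0' ++ nb
      pvEmit (padded ++ st.2) st.1)
    ([], [])
  if st.2 ≠ [] then st.1 ++ [pvInt2 st.2] else st.1

-- ===== PORT B =====
-- bin(n)[2:].zfill(L): exact for n ≥ 0 (Pre_); zfill pads to width L with '0', no-op if L ≤ len
def pvZfill (n : Int) (L : Int) : List Char :=
  let nb := pvBin n.toNat
  List.replicate (L - (nb.length : Int)).toNat '0' ++ nb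

-- `for _ in range(k): yield acc % 256; acc >>= 8` (acc >>= 8 is floor division by 256)
def pvEmitLoop (acc : Int) (k : Nat) (out : List Int) : List Int × Int :=
  match k with
  | 0 => (out, acc)
  | (k+1) => pvEmitLoop (PySem.Int.floordiv acc 256) k (out ++ [PySem.Int.mod acc 256])

def packlzw_alt (codes : List (Int × Int)) : List Int :=
  let stream := (codes.reverse.map (fun nc => pvZfill nc.1 nc.2)).flatten
  let acc := if stream ≠ [] then pvInt2 stream else 0
  let st := pvEmitLoop acc (stream.length / 8) []
  if stream.length % 8 ≠ 0 then st.1 ++ [st.2] else st.1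

-- ===== PRECONDITION & SPEC =====
-- Pre_ excludes codes with a negative n: bin() then leaks a stray 'b' character into the bit
-- string, on which A usually raises ValueError and otherwise returns an accidental value of
-- int()'s '0b'-literal-prefix parsing.
def Pre_packlzw (codes : List (Int × Int)) : Prop := ∀ p ∈ codes, 0 ≤ p.1
instance (codes : List (Int × Int)) : Decidable (Pre_packlzw codes) := by unfold Pre_packlzw; infer_instance

def pvWitness_packlzw : (List (Int × Int)) := [(5, 3), (1, 4), (300, 9), (0, 2)]

def Spec_packlzw (codes : List (Int × Int)) (out : List Int) : Prop := out = packlzw_alt codes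
instance (codes : List (Int × Int)) (out : List Int) : Decidable (Spec_packlzw codes out) := by unfold Spec_packlzw; infer_instance

-- ===== CLAIM (what is proved, stated in full; the proofs are below) =====
def Claim_equal_packlzw : Prop := ∀ (codes : List (Int × Int)), Dom_packlzw codes → Pre_packlzw codes → Spec_packlzw codes (packlzw codes)

-- ===== LEMMAS AND PROOFS =====

-- value of a bit string, most significant first
def valN (s : List Char) : Nat := s.foldl (fun a c => 2 * a + (if c = '1' then 1 else 0)) 0

-- value of an already-emitted byte list (little-endian base 256)
def outVal (out : List Int) : Nat := out.foldr (fun b a => b.toNat + 256 * a) 0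

def isBit (c : Char) : Prop := c = '0' ∨ c = '1'

-- the full bit string A's buffer accumulates: later codes to the left
def Scat (cs : List (Int × Int)) : List Char :=
  ((cs.map (fun nc => pvZfill nc.1 nc.2)).reverse).flatten

theorem valN_aux (s : List Char) : ∀ a : Nat,
    s.foldl (fun a c => 2 * a + (if c = '1' then 1 else 0)) a = a * 2 ^ s.length + valN s := by
  induction s with
  | nil => intro a; simp [valN]
  | cons c s ih =>
      intro a
      simp only [List.foldl_cons, List.length_cons, valN] at *
      rw [ih, ih (2 * 0 + _)]
      ring

theorem valN_append (s t : List Char) : valN (s ++ t) = valN s * 2 ^ t.length + valN t := by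
  simp only [valN, List.foldl_append]
  exact valN_aux t _

theorem valN_lt (s : List Char) (h : ∀ c ∈ s, isBit c) : valN s < 2 ^ s.length := by
  induction s with
  | nil => simp [valN]
  | cons c s ih =>
      have hc := h c (by simp)
      have hs := ih (fun c hc => h c (by simp [hc]))
      show valN (c :: s) < 2 ^ (s.length + 1)
      have : valN (c :: s) = (2 * 0 + (if c = '1' then 1 else 0)) * 2 ^ s.length + valN s := by
        simp only [valN, List.foldl_cons]; exact valN_aux s _
      rw [this, pow_succ]
      rcases hc with h1 | h1 <;> simp [h1] <;> omega

theorem pvInt2_eq (s : List Char) : pvInt2 s = (valN s : Nat) := by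
  have : ∀ a : Nat, s.foldl (fun (a : Int) c => 2 * a + (if c = '1' then 1 else 0)) a
      = ((s.foldl (fun (a : Nat) c => 2 * a + (if c = '1' then 1 else 0)) a : Nat) : Int) := by
    induction s with
    | nil => intro a; simp
    | cons c s ih =>
        intro a
        simp only [List.foldl_cons]
        rw [show (2 * (a : Int) + (if c = '1' then 1 else 0))
              = ((2 * a + (if c = '1' then 1 else 0) : Nat) : Int) by push_cast; split <;> simp]
        exact ih _
  simpa [pvInt2, valN] using this 0

theorem pvBin_bits (n : Nat) : ∀ c ∈ pvBin n, isBit c := by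
  have aux : ∀ m, ∀ c ∈ pvBinAux m, isBit c := by
    intro m
    induction m using Nat.strong_induction_on with
    | _ m ih =>
      match m with
      | 0 => simp [pvBinAux]
      | (k+1) =>
          rw [pvBinAux]
          intro c hc
          rcases List.mem_append.1 hc with h | h
          · exact ih ((k+1)/2) (Nat.div_lt_self (Nat.succ_pos k) one_lt_two) c h
          · simp at h; split at h <;> simp [isBit, h]
  intro c hc
  by_cases h : n = 0
  · simp [pvBin, h] at hc; simp [isBit, hc]
  · exact aux n c (by simpa [pvBin, h] using hc)

theorem outVal_cons (x : Int) (l : List Int) : outVal (x :: l) = x.toNat + 256 * outVal l := rfl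

theorem outVal_snoc (out : List Int) (b : Int) :
    outVal (out ++ [b]) = outVal out + b.toNat * 256 ^ out.length := by
  induction out with
  | nil => simp [outVal]
  | cons x out ih =>
      rw [List.cons_append, outVal_cons, ih, outVal_cons, List.length_cons, pow_succ]
      ring

theorem pvEmit_step (s : List Char) (o : List Int) (h : 8 ≤ s.length) :
    pvEmit s o = pvEmit (s.take (s.length - 8)) (o ++ [pvInt2 (s.drop (s.length - 8))]) := by
  rw [pvEmit, if_pos h]

theorem pvEmit_done (s : List Char) (o : List Int) (h : ¬ 8 ≤ s.length) :
    pvEmit s o = (o, s) := by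
  rw [pvEmit, if_neg h]

theorem pvEmit_rem_lt (s : List Char) (o : List Int) : (pvEmit s o).2.length < 8 := by
  by_cases h : 8 ≤ s.length
  · rw [pvEmit_step s o h]
    exact pvEmit_rem_lt _ _
  · rw [pvEmit_done s o h]
    show s.length < 8
    omega
termination_by s.length
decreasing_by simp; omega

-- characterisation of A's inner while-loop
theorem pvEmit_spec (t : List Char) (out : List Int) (hb : ∀ c ∈ t, isBit c) :
    (pvEmit t out).2 = t.take (t.length % 8) ∧
    (pvEmit t out).1.length = out.length + t.length / 8 ∧
    outVal (pvEmit t out).1 = outVal out + valN (t.drop (t.length % 8)) * 256 ^ out.length ∧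
    (∀ b ∈ (pvEmit t out).1, b ∈ out ∨ (0 ≤ b ∧ b < 256)) := by
  by_cases h : 8 ≤ t.length
  · set t' := t.take (t.length - 8) with ht'
    set tail := t.drop (t.length - 8) with htail
    have hlen' : t'.length = t.length - 8 := by simp [ht']
    have htlen : tail.length = 8 := by simp [htail]; omega
    have hsplit : t' ++ tail = t := List.take_append_drop _ _
    have hb' : ∀ c ∈ t', isBit c := fun c hc => hb c ((List.take_sublist _ _).subset hc)
    have hbtail : ∀ c ∈ tail, isBit c := fun c hc => hb c ((List.drop_sublist _ _).subset hc)
    have hunf : pvEmit t out = pvEmit t' (out ++ [pvInt2 tail]) := by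
      rw [pvEmit, if_pos h]
    obtain ⟨ih1, ih2, ih3, ih4⟩ := pvEmit_spec t' (out ++ [pvInt2 tail]) hb'
    have hmod : t'.length % 8 = t.length % 8 := by omega
    have hk8 : t.length % 8 ≤ t.length - 8 := by omega
    refine ⟨?_, ?_, ?_, ?_⟩
    · rw [hunf, ih1, hmod, ht', List.take_take, min_eq_left hk8]
    · rw [hunf, ih2, hlen']
      simp only [List.length_append, List.length_cons, List.length_nil]
      omega
    · rw [hunf, ih3, hmod, outVal_snoc]
      have hbyte : (pvInt2 tail).toNat = valN tail := by rw [pvInt2_eq]; simp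
      rw [hbyte]
      have hdrop : t.drop (t.length % 8) = t'.drop (t.length % 8) ++ tail := by
        have h0 : (t' ++ tail).drop (t.length % 8) = t'.drop (t.length % 8) ++ tail :=
          List.drop_append_of_le_length (by omega)
        rw [hsplit] at h0
        exact h0
      rw [hdrop, valN_append, htlen]
      simp only [List.length_append, List.length_cons, List.length_nil]
      ring
    · rw [hunf]
      intro b hbmem
      rcases ih4 b hbmem with hmem | hlt
      · rcases List.mem_append.1 hmem with hmem | hmem
        · exact Or.inl hmem
        · simp at hmem
          subst hmem
          right
          have h1 := pvInt2_eq tail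
          have h2 : valN tail < 2 ^ (8:Nat) := htlen ▸ valN_lt tail hbtail
          constructor
          · rw [h1]; positivity
          · rw [h1]; exact_mod_cast h2
      · exact Or.inr hlt
  · rw [pvEmit, if_neg h]
    have : t.length % 8 = t.length := Nat.mod_eq_of_lt (by omega)
    refine ⟨by simp [this], by simp; omega, by simp [this, valN], fun b hb => Or.inl hb⟩
termination_by t.length
decreasing_by simp; omega

-- pvEmit is incremental from the right: new material on the left only delays emission
theorem pvEmit_append (x S : List Char) (o : List Int) :
    pvEmit (x ++ S) o = pvEmit (x ++ (pvEmit S o).2) (pvEmit S o).1 := by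
  by_cases h : 8 ≤ S.length
  · have hx : 8 ≤ (x ++ S).length := by simp; omega
    have hlen : (x ++ S).length - 8 = x.length + (S.length - 8) := by simp; omega
    have htake : (x ++ S).take ((x ++ S).length - 8) = x ++ S.take (S.length - 8) := by
      rw [hlen, List.take_append, List.take_of_length_le (by omega), Nat.add_sub_cancel_left]
    have hdrop : (x ++ S).drop ((x ++ S).length - 8) = S.drop (S.length - 8) := by
      rw [hlen, List.drop_append, List.drop_eq_nil_of_le (by omega), Nat.add_sub_cancel_left,
        List.nil_append]
    rw [pvEmit_step (x ++ S) o hx, htake, hdrop,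
        pvEmit_append x (S.take (S.length - 8)) (o ++ [pvInt2 (S.drop (S.length - 8))]),
        ← pvEmit_step S o h]
  · rw [pvEmit_done S o h]
termination_by S.length
decreasing_by simp; omega

-- A's fold over the codes equals one pvEmit run over the complete bit string
theorem foldA (cs : List (Int × Int)) : ∀ (o : List Int) (b : List Char), b.length < 8 →
    cs.foldl (fun (st : List Int × List Char) nc =>
        let nb := pvBin nc.1.toNat
        let padded := List.replicate (nc.2 - (nb.length : Int)).toNat '0' ++ nb
        pvEmit (padded ++ st.2) st.1) (o, b)
    = pvEmit (Scat cs ++ b) o := by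
  induction cs with
  | nil =>
      intro o b hb
      simp only [List.foldl_nil, Scat, List.map_nil, List.reverse_nil, List.flatten_nil,
        List.nil_append]
      rw [pvEmit_done b o (by omega)]
  | cons c cs ih =>
      intro o b hb
      simp only [List.foldl_cons]
      have hstep : (let nb := pvBin c.1.toNat
          let padded := List.replicate (c.2 - (nb.length : Int)).toNat '0' ++ nb
          pvEmit (padded ++ b) o) = pvEmit (pvZfill c.1 c.2 ++ b) o := rfl
      rw [hstep]
      set p := pvEmit (pvZfill c.1 c.2 ++ b) o with hp
      have hscat : Scat (c :: cs) = Scat cs ++ pvZfill c.1 c.2 := by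
        simp [Scat, List.flatten_append]
      rw [show p = (p.1, p.2) from rfl, ih p.1 p.2 (pvEmit_rem_lt _ _), hscat,
        List.append_assoc, pvEmit_append (Scat cs) (pvZfill c.1 c.2 ++ b) o, ← hp]

-- B's counted byte-emission loop peels a byte list off the accumulator
theorem pvEmitLoop_spec (o : List Int) : ∀ (v : Nat) (acc0 : List Int),
    (∀ b ∈ o, 0 ≤ b ∧ b < 256) →
    pvEmitLoop ((outVal o + v * 256 ^ o.length : Nat) : Int) o.length acc0 = (acc0 ++ o, (v : Int)) := by
  induction o with
  | nil =>
      intro v acc0 _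
      simp [pvEmitLoop, outVal]
  | cons b o ih =>
      intro v acc0 hbd
      have hb := hbd b (by simp)
      have hacc : ((outVal (b :: o) + v * 256 ^ (b :: o).length : Nat) : Int)
          = b + 256 * ((outVal o + v * 256 ^ o.length : Nat) : Int) := by
        rw [outVal_cons, List.length_cons, pow_succ]
        push_cast
        rw [Int.toNat_of_nonneg hb.1]
        ring
      show pvEmitLoop _ (o.length + 1) acc0 = _
      rw [pvEmitLoop, hacc]
      have hmd : PySem.Int.mod (b + 256 * ((outVal o + v * 256 ^ o.length : Nat) : Int)) 256 = b := by
        rw [PySem.Int.mod_eq_emod_of_pos (by norm_num)]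
        omega
      have hfd : PySem.Int.floordiv (b + 256 * ((outVal o + v * 256 ^ o.length : Nat) : Int)) 256
          = ((outVal o + v * 256 ^ o.length : Nat) : Int) := by
        rw [PySem.Int.floordiv_eq_ediv_of_pos (by norm_num)]
        omega
      rw [hmd, hfd, ih v (acc0 ++ [b]) (fun x hx => hbd x (by simp [hx]))]
      simp

-- every character of the complete bit string is a bit
theorem scat_bits (cs : List (Int × Int)) : ∀ c ∈ Scat cs, isBit c := by
  intro c hc
  simp only [Scat, List.mem_flatten, List.mem_reverse, List.mem_map] at hc
  obtain ⟨l, ⟨nc, _, rfl⟩, hcl⟩ := hc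
  rcases List.mem_append.1 hcl with h | h
  · left; exact List.eq_of_mem_replicate h
  · exact pvBin_bits _ c h

-- ===== VERDICT (by name: the statement is the Claim_ definition above) =====
theorem packlzw_spec : Claim_equal_packlzw := by
  intro codes _ _
  show packlzw codes = packlzw_alt codes
  have hA : packlzw codes
      = (if (pvEmit (Scat codes) []).2 ≠ []
          then (pvEmit (Scat codes) []).1 ++ [pvInt2 (pvEmit (Scat codes) []).2]
          else (pvEmit (Scat codes) []).1) := by
    unfold packlzw
    rw [foldA codes [] [] (by simp), List.append_nil]
  have hstream : (codes.reverse.map (fun nc => pvZfill nc.1 nc.2)).flatten = Scat codes := by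
    rw [Scat, List.map_reverse]
  have hB : packlzw_alt codes
      = (if (Scat codes).length % 8 ≠ 0
          then (pvEmitLoop (if Scat codes ≠ [] then pvInt2 (Scat codes) else 0)
                  ((Scat codes).length / 8) []).1
               ++ [(pvEmitLoop (if Scat codes ≠ [] then pvInt2 (Scat codes) else 0)
                  ((Scat codes).length / 8) []).2]
          else (pvEmitLoop (if Scat codes ≠ [] then pvInt2 (Scat codes) else 0)
                  ((Scat codes).length / 8) []).1) := by
    unfold packlzw_alt
    rw [hstream]
  rw [hA, hB]
  obtain ⟨e1, e2, e3, e4⟩ := pvEmit_spec (Scat codes) [] (scat_bits codes)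
  simp only [List.length_nil, pow_zero, mul_one, Nat.zero_add] at e2 e3
  have e3' : outVal (pvEmit (Scat codes) []).1 = valN ((Scat codes).drop ((Scat codes).length % 8)) := by
    rw [e3]; simp [outVal]
  have hbytes : ∀ b ∈ (pvEmit (Scat codes) []).1, 0 ≤ b ∧ b < 256 := by
    intro b hb
    rcases e4 b hb with h | h
    · simp at h
    · exact h
  have hval : valN (Scat codes)
      = outVal (pvEmit (Scat codes) []).1
        + valN ((pvEmit (Scat codes) []).2) * 256 ^ ((pvEmit (Scat codes) []).1.length) := by
    rw [e1, e3', e2]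
    conv_lhs => rw [← List.take_append_drop ((Scat codes).length % 8) (Scat codes)]
    rw [valN_append]
    have hdlen : ((Scat codes).drop ((Scat codes).length % 8)).length
        = 8 * ((Scat codes).length / 8) := by simp; omega
    rw [hdlen, show (2:Nat) ^ (8 * ((Scat codes).length / 8))
        = 256 ^ ((Scat codes).length / 8) by rw [pow_mul]; norm_num]
    exact Nat.add_comm _ _
  have hacc : (if Scat codes ≠ [] then pvInt2 (Scat codes) else 0)
      = ((valN (Scat codes) : Nat) : Int) := by
    by_cases h : Scat codes = []
    · rw [if_neg (by simp [h]), h]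
      simp [valN]
    · rw [if_pos h, pvInt2_eq]
  rw [hacc, hval, ← e2,
    pvEmitLoop_spec (pvEmit (Scat codes) []).1 (valN (pvEmit (Scat codes) []).2) [] hbytes]
  have hiff : (pvEmit (Scat codes) []).2 = [] ↔ (Scat codes).length % 8 = 0 := by
    rw [e1]
    constructor
    · intro h
      rcases List.take_eq_nil_iff.mp h with h | h
      · exact h
      · simp [h]
    · intro h
      rw [h]
      simp
  by_cases h : (Scat codes).length % 8 = 0
  · rw [if_neg (by simpa using hiff.mpr h), if_neg (by simpa using h)]
    simp
  · rw [if_pos (fun hc => h (hiff.mp hc)), if_pos (by simpa using h), pvInt2_eq]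
    simp
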